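-- pv_equiv track=rewrite | github.com/kodzyz/Python_1_1824 | 1824_GB_Python_1/Daviduk_Kosta_dz_1/task_1_2.py | sum_dig_div7
-- ===== SOURCE A (Python) =====
-- def sum_dig_div7(x):
--     idx = x
--     sum_digit = 0
--     digit = 0
--     while idx > 0:
-- 		   digit = idx % 10	  #извлечь последнюю цифру числа
-- 		   sum_digit += digit # сумма цифр числа
-- 		   idx //= 10     #Избавиться от последней цифр числа
--     if sum_digit % 7 == 0:    #которые делятся нацело на 7
--          return True          #правда
-- ===== SOURCE B (Python) =====
-- def sum_dig_div7(x):
--     s = sum(map(int, str(x))) if x > 0 else 0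
--     if s % 7 == 0:
--         return True
-- ===== Notes on version B (the rewrite author's own statement) =====
-- stated objective: idiomatic
-- what changed: B computes the digit sum by mapping int over the decimal string of x (guarded to 0 for x <= 0, where A's loop never runs) instead of A's while loop with repeated % 10 and //= 10, then keeps the same True / fall-through-None result.
import Mathlib
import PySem

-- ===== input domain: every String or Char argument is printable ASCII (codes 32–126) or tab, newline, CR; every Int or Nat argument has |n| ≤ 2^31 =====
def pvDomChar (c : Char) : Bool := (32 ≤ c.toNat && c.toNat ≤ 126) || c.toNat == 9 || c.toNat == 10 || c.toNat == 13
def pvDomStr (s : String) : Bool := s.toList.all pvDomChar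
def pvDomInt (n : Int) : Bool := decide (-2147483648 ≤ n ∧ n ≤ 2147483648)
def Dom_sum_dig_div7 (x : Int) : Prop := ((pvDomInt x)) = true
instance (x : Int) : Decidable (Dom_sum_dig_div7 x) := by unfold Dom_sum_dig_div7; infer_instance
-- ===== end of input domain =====

-- B replaces A's %10 // 10 while-loop by mapping int over the decimal string of x (0 for x ≤ 0);
-- objective: idiomatic. Same True / fall-through-None result.

-- ===== PORT A =====
-- the while loop: idx > 0 → take last digit, add, strip it
def sum_dig_div7_loop (idx sum_digit : Int) : Int :=
  if idx > 0 then
    sum_dig_div7_loop (PySem.Int.floordiv idx 10) (sum_digit + PySem.Int.mod idx 10)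
  else sum_digit
termination_by idx.toNat
decreasing_by
  rw [PySem.Int.floordiv_eq_ediv_of_pos (by omega)]
  omega

def sum_dig_div7 (x : Int) : Option Bool :=
  let sum_digit := sum_dig_div7_loop x 0
  if PySem.Int.mod sum_digit 7 = 0 then some true else none

-- ===== PORT B =====
-- int(d) for a single char; str(x) of a positive x is all digits, so int never raises here
def pyIntOfDigit (c : Char) : Int := (PySem.Int.ofChars? [c]).getD 0

def sum_dig_div7_alt (x : Int) : Option Bool :=
  let s : Int := if x > 0 then ((PySem.Int.toStr x).toList.map pyIntOfDigit).sum else 0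
  if PySem.Int.mod s 7 = 0 then some true else none

-- ===== PRECONDITION & SPEC =====
def Spec_sum_dig_div7 (x : Int) (out : Option Bool) : Prop := out = sum_dig_div7_alt x
instance (x : Int) (out : Option Bool) : Decidable (Spec_sum_dig_div7 x out) := by unfold Spec_sum_dig_div7; infer_instance

-- ===== CLAIM (what is proved, stated in full; the proofs are below) =====
def Claim_equal_sum_dig_div7 : Prop := ∀ (x : Int), Dom_sum_dig_div7 x → Spec_sum_dig_div7 x (sum_dig_div7 x)

-- ===== LEMMAS AND PROOFS =====

-- mathematical digit sum, used as the common value of both programs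
def dsum (n : Nat) : Nat :=
  if n = 0 then 0 else n % 10 + dsum (n / 10)
decreasing_by omega

theorem pyIntOfDigit_digitChar (m : Nat) (h : m < 10) :
    pyIntOfDigit (Nat.digitChar m) = (m : Int) := by
  interval_cases m <;> decide

theorem toDigitsCore_sum :
    ∀ (f n : Nat) (acc : List Char), n < 10 ^ f →
      ((Nat.toDigitsCore 10 f n acc).map pyIntOfDigit).sum
        = (dsum n : Int) + ((acc.map pyIntOfDigit).sum) := by
  intro f
  induction f with
  | zero =>
    intro n acc h
    have hn : n = 0 := by omega
    subst hn
    simp [Nat.toDigitsCore, dsum]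
  | succ f ih =>
    intro n acc h
    rw [Nat.toDigitsCore]
    have hm : n % 10 < 10 := Nat.mod_lt _ (by omega)
    by_cases h0 : n / 10 = 0
    · simp only [h0, if_true]
      rw [List.map_cons, List.sum_cons, pyIntOfDigit_digitChar _ hm]
      rw [dsum]
      by_cases hz : n = 0
      · subst hz; simp
      · rw [if_neg hz, h0, dsum, if_pos rfl]
        push_cast; ring
    · rw [if_neg h0]
      have hlt : n / 10 < 10 ^ f := by
        have h10 : n / 10 < 10 ^ (f + 1) / 10 := by
          apply Nat.div_lt_div_of_lt_of_dvd
          · exact Dvd.intro (10 ^ f) (by ring)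
          · exact h
        calc n / 10 < 10 ^ (f + 1) / 10 := h10
          _ = 10 ^ f := by rw [pow_succ, Nat.mul_div_cancel _ (by norm_num)]
      rw [ih _ _ hlt]
      rw [List.map_cons, List.sum_cons, pyIntOfDigit_digitChar _ hm]
      have hnz : n ≠ 0 := by
        intro hz; subst hz; simp at h0
      conv_rhs => rw [dsum, if_neg hnz]
      push_cast; ring

theorem loop_eq_dsum : ∀ (idx s : Int), sum_dig_div7_loop idx s = s + (dsum idx.toNat : Int) := by
  intro idx s
  induction idx, s using sum_dig_div7_loop.induct with
  | case1 idx s hpos ih =>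
    rw [sum_dig_div7_loop, if_pos hpos, ih]
    rw [PySem.Int.floordiv_eq_ediv_of_pos (by omega), PySem.Int.mod_eq_emod_of_pos (by omega)]
    have hnz : idx.toNat ≠ 0 := by omega
    conv_rhs => rw [dsum, if_neg hnz]
    have h1 : (idx / 10).toNat = idx.toNat / 10 := by omega
    have h2 : idx % 10 = ((idx.toNat % 10 : Nat) : Int) := by omega
    rw [h1, h2]
    push_cast; ring
  | case2 idx s hpos =>
    rw [sum_dig_div7_loop, if_neg hpos]
    have : idx.toNat = 0 := by omega
    rw [this, dsum]
    simp

theorem alt_sum_eq_dsum (x : Int) :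
    (if x > 0 then ((PySem.Int.toStr x).toList.map pyIntOfDigit).sum else 0) = (dsum x.toNat : Int) := by
  by_cases hx : x > 0
  · rw [if_pos hx, PySem.Int.toList_toStr, PySem.Int.toChars, if_neg (by omega)]
    rw [Nat.toDigits]
    have hb : x.toNat < 10 ^ (x.toNat + 1) := by
      calc x.toNat < 10 ^ x.toNat := Nat.lt_pow_self (by omega)
        _ ≤ 10 ^ (x.toNat + 1) := Nat.pow_le_pow_right (by omega) (by omega)
    rw [toDigitsCore_sum _ _ _ hb]
    simp
  · rw [if_neg hx]
    have : x.toNat = 0 := by omega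
    rw [this, dsum]
    simp

-- ===== VERDICT (by name: the statement is the Claim_ definition above) =====
theorem sum_dig_div7_spec : Claim_equal_sum_dig_div7 := by
  intro x _
  unfold Spec_sum_dig_div7 sum_dig_div7 sum_dig_div7_alt
  rw [loop_eq_dsum, alt_sum_eq_dsum]
  simp
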